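-- pv_equiv track=rewrite | github.com/NicolasWltr/AdventOfCode | AOC_2025/DAY_2.py | get_invalid_id_sub
-- ===== SOURCE A (Python) =====
-- def split_string(s, n):
--     return [s[i:i+n] for i in range(0, len(s), n)]
--
-- def get_invalid_id_sub(range_as_tuple):
--     first, last = range_as_tuple
--
--     invalid_ids = set()
--
--     for i in range(first, last + 1):
--         as_string = str(i)
--
--         for split_length in range(1, len(as_string) // 2 + 1):
--             if len(as_string) % split_length != 0:
--                 continue
--             split = split_string(as_string, split_length)
--
--             invalid = True
--
--             for j in range(len(split) - 1):
--                 if split[j] != split[j + 1]: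
--                     invalid = False
--                     break
--             if invalid:
--                 invalid_ids.add(i)
--
--     return invalid_ids
-- ===== SOURCE B (Python) =====
-- def get_invalid_id_sub(range_as_tuple):
--     # Enumerate repeated-block numbers directly instead of testing every id in the range.
--     first, last = range_as_tuple
--     candidates = []
--     for total_len in range(2, len(str(last)) + 1):
--         for block_len in range(1, total_len // 2 + 1):
--             if total_len % block_len != 0:
--                 continue
--             for block in range(10 ** (block_len - 1), 10 ** block_len):
--                 m = 0
--                 for _ in range(total_len // block_len):
--                     m = m * 10 ** block_len + block
--                 if first <= m <= last:
--                     candidates.append(m)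
--     return set(sorted(candidates))
-- ===== Notes on version B (the rewrite author's own statement) =====
-- stated objective: faster
-- what changed: A scans every id in the range and tests its digit string for a repeated block; B never scans the range: it enumerates the repeated-block numbers directly (per digit-length and dividing block-length, every block value without leading zero), keeps those inside the range and returns them as a set.
import Mathlib
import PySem

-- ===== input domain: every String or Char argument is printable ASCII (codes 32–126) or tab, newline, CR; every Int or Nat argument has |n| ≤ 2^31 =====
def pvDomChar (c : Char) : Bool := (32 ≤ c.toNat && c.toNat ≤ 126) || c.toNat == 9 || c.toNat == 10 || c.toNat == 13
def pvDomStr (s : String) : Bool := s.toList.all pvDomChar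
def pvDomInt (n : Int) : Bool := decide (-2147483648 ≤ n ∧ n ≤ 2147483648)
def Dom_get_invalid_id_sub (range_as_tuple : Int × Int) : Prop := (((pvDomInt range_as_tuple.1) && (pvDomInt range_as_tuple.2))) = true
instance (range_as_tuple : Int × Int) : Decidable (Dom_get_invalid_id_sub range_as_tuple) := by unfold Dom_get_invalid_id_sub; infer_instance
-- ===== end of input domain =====

-- B enumerates the repeated-block numbers directly (block value per length/divisor,
-- then a range filter and a sort) instead of testing every id in the range; for wide
-- ranges this avoids the per-id scan entirely. Return value proved equal to A's.


-- ===== PORT A =====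
-- split_string(s, n) = [s[i:i+n] for i in range(0, len(s), n)]
def pvSplitString (s : List Char) (n : Int) : List (List Char) :=
  (PySem.List.pyRange 0 (s.length : Int) n).map
    (fun i => PySem.List.slice s (some i) (some (i + n)))

-- the 'for j in range(len(split) - 1): if split[j] != split[j + 1]: invalid = False; break'
-- loop, as a recursion over the index list that returns early on the first mismatch
-- (indices are always in range here, so pyGetD with a default is exact)
def pvAdjLoop (split : List (List Char)) : List Int → Bool
  | [] => true
  | j :: js =>
    if PySem.List.pyGetD split j [] ≠ PySem.List.pyGetD split (j + 1) [] then false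
    else pvAdjLoop split js

def get_invalid_id_sub (range_as_tuple : Int × Int) : List Int :=
  let first := range_as_tuple.1
  let last := range_as_tuple.2
  (PySem.List.pyRange first (last + 1) 1).foldl
    (fun invalid_ids i =>
      let as_string := PySem.Int.toChars i
      (PySem.List.pyRange 1 (PySem.Int.floordiv (as_string.length : Int) 2 + 1) 1).foldl
        (fun invalid_ids split_length =>
          if PySem.Int.mod (as_string.length : Int) split_length ≠ 0 then invalid_ids
          else
            let split := pvSplitString as_string split_length
            let invalid := pvAdjLoop split (PySem.List.pyRange 0 ((split.length : Int) - 1) 1)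
            if invalid then PySem.Set.add invalid_ids i else invalid_ids)
        invalid_ids)
    PySem.Set.empty

-- ===== PORT B =====
-- Source B: enumerate block values per (total_len, block_len) with total_len % block_len == 0,
-- build each candidate by the 'm = m * 10 ** block_len + block' loop, keep those in range,
-- then 'return set(sorted(candidates))'.  '10 ** e' with e ≥ 0 here is '(10:Int) ^ e.toNat'
-- (exact: block_len ≥ 1 inside its range), and 'range(r)' for the repeat count r ≥ 0 is
-- 'List.range r.toNat' (exact for r ≥ 0).
def get_invalid_id_sub_alt (range_as_tuple : Int × Int) : List Int :=
  let first := range_as_tuple.1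
  let last := range_as_tuple.2
  let candidates :=
    (PySem.List.pyRange 2 (((PySem.Int.toChars last).length : Int) + 1) 1).foldl
      (fun candidates total_len =>
        (PySem.List.pyRange 1 (PySem.Int.floordiv total_len 2 + 1) 1).foldl
          (fun candidates block_len =>
            if PySem.Int.mod total_len block_len ≠ 0 then candidates
            else
              (PySem.List.pyRange ((10 : Int) ^ (block_len - 1).toNat) ((10 : Int) ^ block_len.toNat) 1).foldl
                (fun candidates block =>
                  let m := (List.range (PySem.Int.floordiv total_len block_len).toNat).foldl
                      (fun m _ => m * (10 : Int) ^ block_len.toNat + block) 0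
                  if first ≤ m ∧ m ≤ last then candidates ++ [m] else candidates)
                candidates)
          candidates)
      []
  PySem.Set.ofList (PySem.List.sorted candidates (fun x => x) false)

-- ===== PRECONDITION & SPEC =====
def Spec_get_invalid_id_sub (range_as_tuple : Int × Int) (out : List Int) : Prop := out = get_invalid_id_sub_alt range_as_tuple
instance (range_as_tuple : Int × Int) (out : List Int) : Decidable (Spec_get_invalid_id_sub range_as_tuple out) := by unfold Spec_get_invalid_id_sub; infer_instance

-- ===== CLAIM (what is proved, stated in full; the proofs are below) =====
def Claim_equal_get_invalid_id_sub : Prop := ∀ (range_as_tuple : Int × Int), Dom_get_invalid_id_sub range_as_tuple → Spec_get_invalid_id_sub range_as_tuple (get_invalid_id_sub range_as_tuple)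

-- ===== LEMMAS AND PROOFS =====

-- decimal-representation core
def pvRepr (n : Nat) : List Char :=
  if h : n < 10 then [Nat.digitChar n]
  else pvRepr (n / 10) ++ [Nat.digitChar (n % 10)]
  decreasing_by exact Nat.div_lt_self (by omega) (by omega)

def pvVal : List Char → Nat
  | [] => 0
  | c :: t => (c.toNat - 48) * 10 ^ t.length + pvVal t

def pvMk (b d : Nat) : Nat → Nat
  | 0 => 0
  | k + 1 => pvMk b d k * 10 ^ d + b

lemma pvRepr_lt {n : Nat} (h : n < 10) : pvRepr n = [Nat.digitChar n] := by
  rw [pvRepr]; simp [h]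

lemma pvRepr_ge {n : Nat} (h : ¬ n < 10) :
    pvRepr n = pvRepr (n / 10) ++ [Nat.digitChar (n % 10)] := by
  rw [pvRepr]; simp [h]

lemma pvToDigitsCore_eq : ∀ (fuel n : Nat) (ds : List Char), n < fuel →
    Nat.toDigitsCore 10 fuel n ds = pvRepr n ++ ds := by
  intro fuel
  induction fuel with
  | zero => intro n ds h; omega
  | succ f ih =>
    intro n ds h
    rw [Nat.toDigitsCore]
    by_cases h10 : n < 10
    · have : n / 10 = 0 := Nat.div_eq_of_lt h10
      simp [this, pvRepr_lt h10, Nat.mod_eq_of_lt h10]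
    · have hlt : n / 10 < f := by
        have := Nat.div_lt_self (by omega : 0 < n) (by omega : 1 < 10)
        omega
      have hne : ¬ n / 10 = 0 := by
        intro h0; have := Nat.lt_of_div_eq_zero (by omega) h0; omega
      simp only [hne, if_false]
      rw [ih _ _ hlt, pvRepr_ge h10]
      simp

lemma pvToChars_nonneg {x : Int} (h : 0 ≤ x) :
    PySem.Int.toChars x = pvRepr x.toNat := by
  unfold PySem.Int.toChars
  rw [if_neg (by omega), Nat.toDigits, pvToDigitsCore_eq _ _ _ (Nat.lt_succ_self _)]
  simp

lemma pvToChars_neg {x : Int} (h : x < 0) :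
    PySem.Int.toChars x = '-' :: pvRepr x.natAbs := by
  unfold PySem.Int.toChars
  rw [if_pos h, Nat.toDigits, pvToDigitsCore_eq _ _ _ (Nat.lt_succ_self _)]
  simp

lemma pvRepr_ne_nil (n : Nat) : pvRepr n ≠ [] := by
  by_cases h : n < 10
  · rw [pvRepr_lt h]; simp
  · rw [pvRepr_ge h]; simp

lemma pvDigitChar_bound {u : Nat} (h : u < 10) :
    48 ≤ (Nat.digitChar u).toNat ∧ (Nat.digitChar u).toNat ≤ 57 := by
  interval_cases u <;> decide

lemma pvRepr_digits (n : Nat) : ∀ c ∈ pvRepr n, 48 ≤ c.toNat ∧ c.toNat ≤ 57 := by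
  induction n using Nat.strong_induction_on with
  | _ n ih =>
    by_cases h : n < 10
    · rw [pvRepr_lt h]
      intro c hc
      simp at hc
      subst hc
      exact pvDigitChar_bound h
    · rw [pvRepr_ge h]
      intro c hc
      rcases List.mem_append.mp hc with hc | hc
      · exact ih (n / 10) (Nat.div_lt_self (by omega) (by omega)) c hc
      · simp at hc; subst hc
        exact pvDigitChar_bound (Nat.mod_lt _ (by omega))

lemma pvDigitChar_val {u : Nat} (h : u < 10) : (Nat.digitChar u).toNat - 48 = u := by
  interval_cases u <;> decide

lemma pvVal_cons (c : Char) (t : List Char) :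
    pvVal (c :: t) = (c.toNat - 48) * 10 ^ t.length + pvVal t := rfl

lemma pvVal_append (s t : List Char) :
    pvVal (s ++ t) = pvVal s * 10 ^ t.length + pvVal t := by
  induction s with
  | nil => simp [pvVal]
  | cons c s ih =>
    rw [List.cons_append, pvVal_cons, pvVal_cons, ih, List.length_append]
    rw [pow_add]
    ring

lemma pvVal_repr (n : Nat) : pvVal (pvRepr n) = n := by
  induction n using Nat.strong_induction_on with
  | _ n ih =>
    by_cases h : n < 10
    · rw [pvRepr_lt h, pvVal_cons]
      simp [pvVal, pvDigitChar_val h]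
    · rw [pvRepr_ge h, pvVal_append]
      rw [ih (n / 10) (Nat.div_lt_self (by omega) (by omega))]
      rw [pvVal_cons]
      simp [pvVal, pvDigitChar_val (Nat.mod_lt n (by omega : 0 < 10))]
      omega

lemma pvVal_lt (t : List Char) (h : ∀ c ∈ t, c.toNat ≤ 57) :
    pvVal t < 10 ^ t.length := by
  induction t with
  | nil => simp [pvVal]
  | cons c t ih =>
    rw [pvVal_cons, List.length_cons]
    have h1 : c.toNat - 48 ≤ 9 := by have := h c (by simp); omega
    have h2 : pvVal t < 10 ^ t.length := ih (fun c hc => h c (by simp [hc]))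
    have : (10:Nat) ^ (t.length + 1) = 10 * 10 ^ t.length := by ring
    nlinarith

lemma pvRepr_bounds {n : Nat} (h : 1 ≤ n) :
    10 ^ ((pvRepr n).length - 1) ≤ n ∧ n < 10 ^ (pvRepr n).length := by
  induction n using Nat.strong_induction_on with
  | _ n ih =>
    by_cases h10 : n < 10
    · rw [pvRepr_lt h10]
      simp only [List.length_cons, List.length_nil, pow_one, pow_zero]
      omega
    · rw [pvRepr_ge h10]
      have hd : 1 ≤ n / 10 := by omega
      obtain ⟨l, u⟩ := ih (n / 10) (Nat.div_lt_self (by omega) (by omega)) hd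
      have hlen : 1 ≤ (pvRepr (n / 10)).length :=
        List.length_pos_of_ne_nil (pvRepr_ne_nil _)
      set L := (pvRepr (n / 10)).length with hL
      have e1 : (10:Nat) ^ L = 10 * 10 ^ (L - 1) := by
        have := pow_succ (10:Nat) (L - 1)
        rw [Nat.sub_add_cancel hlen] at this
        omega
      have e2 : (10:Nat) ^ (L + 1) = 10 * 10 ^ L := by
        have := pow_succ (10:Nat) L
        omega
      have hdm := Nat.div_add_mod n 10
      have hlen2 : (pvRepr (n / 10) ++ [Nat.digitChar (n % 10)]).length = L + 1 := by
        simp only [List.length_append, List.length_cons, List.length_nil]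
        omega
      rw [hlen2, Nat.add_sub_cancel]
      constructor
      · have : 10 * 10 ^ (L - 1) ≤ 10 * (n / 10) := by omega
        omega
      · have : 10 * (n / 10) + 10 ≤ 10 * 10 ^ L := by omega
        omega

lemma pvRepr_len_eq {d b : Nat} (hd : 1 ≤ d) (h1 : 10 ^ (d - 1) ≤ b) (h2 : b < 10 ^ d) :
    (pvRepr b).length = d := by
  have hb : 1 ≤ b := le_trans (Nat.one_le_pow _ _ (by omega)) h1
  obtain ⟨l, u⟩ := pvRepr_bounds hb
  by_contra hne
  rcases Nat.lt_or_ge (pvRepr b).length d with hlt | hge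
  · have : (10:Nat) ^ (pvRepr b).length ≤ 10 ^ (d - 1) :=
      Nat.pow_le_pow_right (by omega) (by omega)
    omega
  · have : (10:Nat) ^ d ≤ 10 ^ ((pvRepr b).length - 1) :=
      Nat.pow_le_pow_right (by omega) (by omega)
    omega

lemma pvRepr_append {a b d : Nat} (ha : 1 ≤ a) (hd : 1 ≤ d)
    (hb1 : 10 ^ (d - 1) ≤ b) (hb2 : b < 10 ^ d) :
    pvRepr (a * 10 ^ d + b) = pvRepr a ++ pvRepr b := by
  induction d generalizing b with
  | zero => omega
  | succ e ih =>
    by_cases he : e = 0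
    · subst he
      have hb10 : b < 10 := by simpa using hb2
      have hm : ¬ a * 10 ^ 1 + b < 10 := by
        simp only [pow_one]; nlinarith
      rw [pvRepr_ge hm]
      have h1 : (a * 10 ^ 1 + b) / 10 = a := by
        simp only [pow_one]; omega
      have h2 : (a * 10 ^ 1 + b) % 10 = b := by
        simp only [pow_one]; omega
      rw [h1, h2, pvRepr_lt hb10]
    · have he1 : 1 ≤ e := by omega
      have hb10 : ¬ b < 10 := by
        have : (10:Nat) ^ 1 ≤ 10 ^ (e + 1 - 1) := Nat.pow_le_pow_right (by omega) (by omega)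
        simp only [pow_one] at this
        omega
      have hm : ¬ a * 10 ^ (e + 1) + b < 10 := by omega
      rw [pvRepr_ge hm]
      have hps : (10:Nat) ^ (e + 1) = 10 ^ e * 10 := pow_succ 10 e
      have h1 : (a * 10 ^ (e + 1) + b) / 10 = a * 10 ^ e + b / 10 := by
        rw [hps, ← mul_assoc]
        omega
      have h2 : (a * 10 ^ (e + 1) + b) % 10 = b % 10 := by
        rw [hps, ← mul_assoc]
        omega
      have hbl : 10 ^ (e - 1) ≤ b / 10 := by
        have hpe : (10:Nat) ^ (e + 1 - 1) = 10 ^ (e - 1) * 10 := by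
          have h' := pow_succ (10:Nat) (e - 1)
          rw [Nat.sub_add_cancel he1] at h'
          rw [Nat.add_sub_cancel, h']
        rw [hpe] at hb1
        omega
      have hbu : b / 10 < 10 ^ e := by
        rw [hps] at hb2
        omega
      rw [h1, h2, ih he1 hbl hbu, pvRepr_ge hb10]
      simp

lemma pvMk_ge {b d k : Nat} (hk : 1 ≤ k) : b ≤ pvMk b d k := by
  induction k with
  | zero => omega
  | succ k ih =>
    rw [pvMk]
    omega

lemma pvRepr_mk {b d : Nat} (hd : 1 ≤ d) (hb1 : 10 ^ (d - 1) ≤ b) (hb2 : b < 10 ^ d) :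
    ∀ k, 1 ≤ k → pvRepr (pvMk b d k) = (List.replicate k (pvRepr b)).flatten := by
  intro k
  induction k with
  | zero => omega
  | succ k ih =>
    intro _
    by_cases hk : k = 0
    · subst hk
      simp [pvMk]
    · have hk1 : 1 ≤ k := by omega
      have hb : 1 ≤ b := le_trans (Nat.one_le_pow _ _ (by omega)) hb1
      have hmk : 1 ≤ pvMk b d k := le_trans hb (pvMk_ge hk1)
      rw [pvMk, pvRepr_append hmk hd hb1 hb2, ih hk1]
      rw [List.replicate_succ' (n := k)]
      simp

lemma pvVal_flatten_replicate (t : List Char) : ∀ k : Nat,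
    pvVal ((List.replicate k t).flatten) = pvMk (pvVal t) t.length k := by
  intro k
  induction k with
  | zero => simp [pvMk, pvVal]
  | succ k ih =>
    rw [List.replicate_succ', List.flatten_append, pvVal_append, ih]
    simp [pvMk, pvVal]

lemma pvRepr_head {n : Nat} (h : 1 ≤ n) :
    ∃ c r, pvRepr n = c :: r ∧ 49 ≤ c.toNat ∧ c.toNat ≤ 57 := by
  induction n using Nat.strong_induction_on with
  | _ n ih =>
    by_cases h10 : n < 10
    · refine ⟨Nat.digitChar n, [], pvRepr_lt h10, ?_⟩
      interval_cases n <;> simp_all <;> decide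
    · obtain ⟨c, r, hcr, hc⟩ := ih (n / 10) (Nat.div_lt_self (by omega) (by omega)) (by omega)
      exact ⟨c, r ++ [Nat.digitChar (n % 10)], by rw [pvRepr_ge h10, hcr]; simp, hc⟩

lemma pvVal_take_lower {n d : Nat} (hn : 1 ≤ n) (hd : 1 ≤ d)
    (hdn : d ≤ (pvRepr n).length) :
    10 ^ (d - 1) ≤ pvVal ((pvRepr n).take d) := by
  obtain ⟨c, r, hcr, hc1, _⟩ := pvRepr_head hn
  rw [hcr] at hdn ⊢
  rw [List.take_cons (by omega : 0 < d), pvVal_cons]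
  have hlen : (r.take (d - 1)).length = d - 1 := by
    rw [List.length_take]
    simp at hdn
    omega
  rw [hlen]
  have : 1 * 10 ^ (d - 1) ≤ (c.toNat - 48) * 10 ^ (d - 1) :=
    Nat.mul_le_mul_right _ (by omega)
  omega

lemma pvRepr_len_mono {m p : Nat} (hm : 1 ≤ m) (hmp : m ≤ p) :
    (pvRepr m).length ≤ (pvRepr p).length := by
  obtain ⟨lm, um⟩ := pvRepr_bounds hm
  obtain ⟨lp, up⟩ := pvRepr_bounds (le_trans hm hmp)
  by_contra hlt
  push_neg at hlt
  have : (10:Nat) ^ (pvRepr p).length ≤ 10 ^ ((pvRepr m).length - 1) :=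
    Nat.pow_le_pow_right (by omega) (by omega)
  omega

lemma pvRepr_ne_minus (n : Nat) : ∀ c ∈ pvRepr n, c ≠ '-' := by
  intro c hc
  have := pvRepr_digits n c hc
  intro h
  subst h
  revert this
  decide

-- the per-id test A performs, as a single boolean predicate (proof-internal)
def pvAtest (s : List Char) : Bool :=
  (PySem.List.pyRange 1 (PySem.Int.floordiv (s.length : Int) 2 + 1) 1).any
    (fun d =>
      PySem.Int.mod (s.length : Int) d == 0 &&
        s == PySem.List.pyRepeat (PySem.List.slice s none (some d))
              (PySem.Int.floordiv (s.length : Int) d))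

-- the chunk list [s[0:e+1], s[e+1:2(e+1)], …] as a structural recursion
def pvChunks : List Char → Nat → List (List Char)
  | [], _ => []
  | c :: cs, k => ((c :: cs).take (k + 1)) :: pvChunks ((c :: cs).drop (k + 1)) k
  termination_by s _ => s.length
  decreasing_by simp

-- "all adjacent chunks are equal"
def pvChain : List (List Char) → Bool
  | [] => true
  | [_] => true
  | a :: b :: t => (a == b) && pvChain (b :: t)

lemma pvAdjLoop_eq_all (split : List (List Char)) (js : List Int) :
    pvAdjLoop split js
      = js.all (fun j => PySem.List.pyGetD split j [] == PySem.List.pyGetD split (j + 1) []) := by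
  induction js with
  | nil => rfl
  | cons j js ih =>
    by_cases h : PySem.List.pyGetD split j [] = PySem.List.pyGetD split (j + 1) []
    · simp [pvAdjLoop, h, ih]
    · simp [pvAdjLoop, h]

lemma pvAllAdjNat (split : List (List Char)) :
    (List.range (split.length - 1)).all
        (fun k => split.getD k [] == split.getD (k + 1) []) = pvChain split := by
  induction split with
  | nil => rfl
  | cons a t ih =>
    cases t with
    | nil => rfl
    | cons b t' =>
      have hlen : (a :: b :: t').length - 1 = ((b :: t').length - 1) + 1 := by simp
      rw [hlen, List.range_succ_eq_map]
      simp only [List.all_cons, List.all_map, Function.comp_def, List.getD_cons_succ] at ih ⊢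
      rw [ih]
      simp [pvChain]

lemma pvAdjLoop_pyRange_eq_chain (split : List (List Char)) :
    pvAdjLoop split (PySem.List.pyRange 0 ((split.length : Int) - 1) 1) = pvChain split := by
  rw [pvAdjLoop_eq_all, PySem.List.pyRange_one]
  have h1 : (((split.length : Int) - 1) - 0).toNat = split.length - 1 := by omega
  rw [h1, ← pvAllAdjNat split]
  have h2 : ∀ k : Nat, PySem.List.pyGetD split ((k : Int) + 1) [] = split.getD (k + 1) [] := by
    intro k
    rw [show ((k : Int) + 1) = (((k + 1 : Nat)) : Int) by push_cast; ring,
      PySem.List.pyGetD_natCast]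
  simp [List.all_map, Function.comp_def, PySem.List.pyGetD_natCast, h2]

lemma pvSplitString_eq_range (s : List Char) (e : Nat) :
    pvSplitString s ((e : Int) + 1)
      = (List.range ((s.length + e) / (e + 1))).map
          (fun k => (s.drop ((e + 1) * k)).take (e + 1)) := by
  unfold pvSplitString
  rw [show ((e : Int) + 1) = (((e + 1 : Nat)) : Int) by push_cast; ring]
  rw [PySem.List.pyRange_of_pos 0 (s.length : Int) (by positivity)]
  by_cases h : (0 : Int) < (s.length : Int)
  · rw [if_pos h]
    have hcnt : (((s.length : Int) - 0 + ((e + 1 : Nat) : Int) - 1) / ((e + 1 : Nat) : Int)).toNat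
        = (s.length + e) / (e + 1) := by
      rw [show ((s.length : Int) - 0 + ((e + 1 : Nat) : Int) - 1) = ((s.length + e : Nat) : Int) by push_cast; ring]
      norm_cast
    rw [hcnt, List.map_map]
    apply List.map_congr_left
    intro k _
    simp only [Function.comp_def, zero_add]
    rw [show (((e + 1 : Nat)) : Int) * (k : Int) = (((e + 1) * k : Nat) : Int) by push_cast; ring]
    rw [show (((( e + 1) * k : Nat)) : Int) + (((e + 1 : Nat)) : Int)
        = ((((e + 1) * k : Nat)) : Int) + (((e + 1 : Nat)) : Int) from rfl]
    rw [PySem.List.slice_natCast_add]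
  · rw [if_neg h]
    have hs : s.length = 0 := by omega
    have : (s.length + e) / (e + 1) = 0 := by
      apply Nat.div_eq_of_lt; omega
    rw [this]; rfl

lemma pvRange_eq_chunks (e : Nat) : ∀ (s : List Char),
    (List.range ((s.length + e) / (e + 1))).map
        (fun k => (s.drop ((e + 1) * k)).take (e + 1)) = pvChunks s e := by
  intro s
  induction s, e using pvChunks.induct with
  | case1 e =>
    have h1 : (([] : List Char).length + e) / (e + 1) = 0 := by
      simp only [List.length_nil, Nat.zero_add]
      exact Nat.div_eq_of_lt (by omega)
    rw [h1]
    simp [pvChunks]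
  | case2 c cs e ih =>
    have h0 : (c :: cs).length + e = cs.length + (e + 1) := by
      simp only [List.length_cons]; omega
    have hcnt : ((c :: cs).length + e) / (e + 1) = cs.length / (e + 1) + 1 := by
      rw [h0]
      exact Nat.add_div_right _ (by omega)
    have hcnt2 : cs.length / (e + 1) = (((c :: cs).drop (e + 1)).length + e) / (e + 1) := by
      simp only [List.length_drop, List.length_cons]
      by_cases hle : e ≤ cs.length
      · congr 1; omega
      · rw [Nat.div_eq_of_lt (by omega), Nat.div_eq_of_lt (by omega)]
    rw [hcnt, List.range_succ_eq_map]
    simp only [List.map_cons, List.map_map, Function.comp_def, Nat.mul_zero, List.drop_zero]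
    rw [show (pvChunks (c :: cs) e) = ((c :: cs).take (e + 1)) :: pvChunks ((c :: cs).drop (e + 1)) e from by simp [pvChunks]]
    congr 1
    rw [hcnt2, ← ih]
    apply List.map_congr_left
    intro k _
    rw [List.drop_drop]
    congr 2
    simp only [Nat.succ_eq_add_one]
    ring

lemma pvChain_chunks (e : Nat) : ∀ (s : List Char), (e + 1) ∣ s.length →
    pvChain (pvChunks s e)
      = (s == (List.replicate (s.length / (e + 1)) (s.take (e + 1))).flatten) := by
  intro s
  induction s, e using pvChunks.induct with
  | case1 e => intro _; simp [pvChunks, pvChain]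
  | case2 c cs e ih =>
    intro hdvd
    have hpos : 0 < (c :: cs).length := by simp
    have hle : e + 1 ≤ (c :: cs).length := Nat.le_of_dvd hpos hdvd
    set s := c :: cs with hs
    set c0 := s.take (e + 1) with hc0
    set t := s.drop (e + 1) with ht
    have hc0len : c0.length = e + 1 := by
      rw [hc0, List.length_take]; omega
    have htlen : t.length = s.length - (e + 1) := by rw [ht, List.length_drop]
    have hdvdt : (e + 1) ∣ t.length := by
      rw [htlen]; exact Nat.dvd_sub hdvd dvd_rfl
    have hslen : s.length = t.length + (e + 1) := by omega
    have hquot : s.length / (e + 1) = t.length / (e + 1) + 1 := by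
      rw [hslen]; exact Nat.add_div_right _ (by omega)
    have hchunks : pvChunks s e = c0 :: pvChunks t e := by
      rw [hs, pvChunks]
    have hsplit : s = c0 ++ t := (List.take_append_drop (e + 1) s).symm
    rcases eq_or_ne t [] with htnil | htne'
    · have hlen1 : s.length = e + 1 := by
        rw [hslen, htnil]; simp
      have hnil : pvChunks t e = [] := by rw [htnil]; simp [pvChunks]
      rw [hchunks, hnil]
      have hq1 : s.length / (e + 1) = 1 := by rw [hquot, htnil]; simp
      have htake : s.take (e + 1) = s := List.take_of_length_le (by omega)
      rw [hq1]
      simp only [pvChain, List.replicate_succ, List.replicate_zero, List.flatten_cons,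
        List.flatten_nil, List.append_nil, Bool.true_eq, beq_iff_eq]
      rw [hc0]
      exact htake.symm
    · have hunf : pvChunks t e = (t.take (e + 1)) :: pvChunks (t.drop (e + 1)) e := by
        obtain ⟨b', ts', hbt⟩ := List.exists_cons_of_ne_nil htne'
        rw [hbt]
        simp [pvChunks]
      have hchain_t : pvChain (c0 :: pvChunks t e) = ((c0 == t.take (e + 1)) && pvChain (pvChunks t e)) := by
        rw [hunf]
        rfl
      set m := t.length / (e + 1) with hm
      have hmpos : 1 ≤ m := by
        rw [hm]
        exact (Nat.one_le_div_iff (by omega)).mpr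
          (Nat.le_of_dvd (List.length_pos_of_ne_nil htne') hdvdt)
      have hflat : (List.replicate (s.length / (e + 1)) c0).flatten
          = c0 ++ (List.replicate m c0).flatten := by
        rw [hquot, List.replicate_succ, List.flatten_cons]
      rw [hchunks, hchain_t, ih hdvdt]
      rw [hflat]
      by_cases hc : c0 = t.take (e + 1)
      · rw [← hc]
        have : (s == c0 ++ (List.replicate m c0).flatten) = (t == (List.replicate m c0).flatten) := by
          rw [hsplit]; simp
        rw [this]; simp
      · have hleft : (c0 == t.take (e + 1)) = false := by
          simp [hc]
        rw [hleft, Bool.false_and]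
        symm
        rw [Bool.eq_false_iff]
        intro hEq
        have hEq' : s = c0 ++ (List.replicate m c0).flatten := by
          simpa using hEq
        have ht' : t = (List.replicate m c0).flatten := by
          have := hsplit ▸ hEq'
          exact List.append_cancel_left this
        have hflat2 : (List.replicate m c0).flatten = c0 ++ (List.replicate (m - 1) c0).flatten := by
          rw [show m = (m - 1) + 1 by omega, List.replicate_succ, List.flatten_cons]
          simp
        apply hc
        rw [ht', hflat2, ← hc0len, List.take_left]

lemma pvTest_eq (s : List Char) (d : Int) (hd : 1 ≤ d) :
    ((!decide (PySem.Int.mod (s.length : Int) d ≠ 0)) &&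
       pvAdjLoop (pvSplitString s d)
         (PySem.List.pyRange 0 (((pvSplitString s d).length : Int) - 1) 1))
    = ((PySem.Int.mod (s.length : Int) d == 0) &&
       (s == PySem.List.pyRepeat (PySem.List.slice s none (some d))
              (PySem.Int.floordiv (s.length : Int) d))) := by
  by_cases hm : PySem.Int.mod (s.length : Int) d = 0
  · obtain ⟨e, he⟩ : ∃ e : Nat, d = ((e + 1 : Nat) : Int) := ⟨(d - 1).toNat, by omega⟩
    have hdvdZ : d ∣ (s.length : Int) := (PySem.Int.mod_eq_zero_iff_dvd _ _).mp hm
    have hdvd : (e + 1) ∣ s.length := by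
      rw [he] at hdvdZ
      exact_mod_cast hdvdZ
    simp only [hm]
    rw [he]
    rw [show (((e + 1 : Nat)) : Int) = ((e : Int) + 1) by push_cast; ring]
    rw [pvSplitString_eq_range s e, pvRange_eq_chunks e s, pvAdjLoop_pyRange_eq_chain,
      pvChain_chunks e s hdvd]
    rw [show ((e : Int) + 1) = (((e + 1 : Nat)) : Int) by push_cast; ring]
    rw [PySem.List.slice_to_natCast]
    rw [show PySem.Int.floordiv (s.length : Int) ((e + 1 : Nat) : Int)
        = ((s.length / (e + 1) : Nat) : Int) from PySem.Int.floordiv_natCast _ _]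
    rw [show PySem.List.pyRepeat (s.take (e + 1)) ((s.length / (e + 1) : Nat) : Int)
        = (List.replicate (s.length / (e + 1)) (s.take (e + 1))).flatten from by
      unfold PySem.List.pyRepeat; rw [Int.toNat_natCast]]
    simp
  · simp [hm]

lemma pvAdd_idem (s : PySem.Set Int) (x : Int) :
    PySem.Set.add (PySem.Set.add s x) x = PySem.Set.add s x := by
  by_cases h : x ∈ s <;> simp [PySem.Set.add, PySem.Set.contains, h]

lemma pvFoldl_if_add_any (p : Int → Bool) (i : Int) (ds : List Int) :
    ∀ (acc : PySem.Set Int),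
      ds.foldl (fun acc d => if p d then PySem.Set.add acc i else acc) acc
        = if ds.any p then PySem.Set.add acc i else acc := by
  induction ds with
  | nil => intro acc; simp
  | cons d ds ih =>
    intro acc
    by_cases h : p d
    · simp only [List.foldl_cons, List.any_cons, h, if_pos, Bool.true_or]
      rw [ih]
      split_ifs with h2
      · exact pvAdd_idem acc i
      · rfl
    · simp [h, ih]

lemma pvInner_eq (i : Int) (acc : PySem.Set Int) :
    (PySem.List.pyRange 1 (PySem.Int.floordiv ((PySem.Int.toChars i).length : Int) 2 + 1) 1).foldl
      (fun invalid_ids split_length =>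
        if PySem.Int.mod ((PySem.Int.toChars i).length : Int) split_length ≠ 0 then invalid_ids
        else
          let split := pvSplitString (PySem.Int.toChars i) split_length
          let invalid := pvAdjLoop split (PySem.List.pyRange 0 ((split.length : Int) - 1) 1)
          if invalid then PySem.Set.add invalid_ids i else invalid_ids)
      acc
    = if pvAtest (PySem.Int.toChars i) then PySem.Set.add acc i else acc := by
  set s := PySem.Int.toChars i with hs
  set pA : Int → Bool := fun d =>
    (!decide (PySem.Int.mod (s.length : Int) d ≠ 0)) &&
      pvAdjLoop (pvSplitString s d)
        (PySem.List.pyRange 0 (((pvSplitString s d).length : Int) - 1) 1) with hpA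
  have hbody : ∀ (acc : PySem.Set Int) (d : Int),
      (if PySem.Int.mod (s.length : Int) d ≠ 0 then acc
       else
         let split := pvSplitString s d
         let invalid := pvAdjLoop split (PySem.List.pyRange 0 ((split.length : Int) - 1) 1)
         if invalid then PySem.Set.add acc i else acc)
      = if pA d then PySem.Set.add acc i else acc := by
    intro acc d
    by_cases hm : PySem.Int.mod (s.length : Int) d = 0
    · simp [hpA, hm]
    · simp [hpA, hm]
  trans ((PySem.List.pyRange 1 (PySem.Int.floordiv ((s.length : Int)) 2 + 1) 1).foldl
      (fun acc d => if pA d then PySem.Set.add acc i else acc) acc)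
  · exact PySem.List.foldl_congr_mem _ _ _ _ (fun acc d _ => hbody acc d)
  rw [pvFoldl_if_add_any]
  have hany : (PySem.List.pyRange 1 (PySem.Int.floordiv (s.length : Int) 2 + 1) 1).any pA
      = pvAtest s := by
    unfold pvAtest
    apply PySem.List.any_congr_mem
    intro d hdmem
    have hd : 1 ≤ d := ((PySem.List.mem_pyRange_one).mp hdmem).1
    exact pvTest_eq s d hd
  rw [hany]

-- ===== A as a filter over the range =====

lemma pvFoldl_add_filter (p : Int → Bool) :
    ∀ (l acc : List Int), l.Nodup → (∀ x ∈ l, x ∉ acc) →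
      l.foldl (fun acc x => if p x then PySem.Set.add acc x else acc) acc
        = acc ++ l.filter p := by
  intro l
  induction l with
  | nil => intro acc _ _; simp
  | cons x l ih =>
    intro acc hnd hacc
    have hx : x ∉ acc := hacc x (by simp)
    have hnd' : l.Nodup := (List.nodup_cons.mp hnd).2
    have hxl : x ∉ l := (List.nodup_cons.mp hnd).1
    simp only [List.foldl_cons]
    by_cases hp : p x
    · have hadd : PySem.Set.add acc x = acc ++ [x] := by
        simp [PySem.Set.add, PySem.Set.contains, hx]
      rw [if_pos hp, hadd, ih (acc ++ [x]) hnd'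
        (by
          intro y hy
          simp only [List.mem_append, List.mem_singleton, not_or]
          exact ⟨hacc y (by simp [hy]), fun h => hxl (h ▸ hy)⟩)]
      simp [hp]
    · rw [if_neg hp, ih acc hnd' (fun y hy => hacc y (by simp [hy]))]
      simp [hp]

lemma pvPyRange_pairwise (a b : Int) : (PySem.List.pyRange a b).Pairwise (· < ·) := by
  rw [PySem.List.pyRange_one]
  refine List.Pairwise.map _ ?_ List.pairwise_lt_range
  intro i j hij
  omega

lemma pvA_eq_filter (rt : Int × Int) :
    get_invalid_id_sub rt
      = (PySem.List.pyRange rt.1 (rt.2 + 1)).filter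
          (fun i => pvAtest (PySem.Int.toChars i)) := by
  unfold get_invalid_id_sub
  trans ((PySem.List.pyRange rt.1 (rt.2 + 1)).foldl
      (fun acc i => if pvAtest (PySem.Int.toChars i) then PySem.Set.add acc i else acc)
      PySem.Set.empty)
  · apply PySem.List.foldl_congr_mem
    intro acc i _
    exact pvInner_eq i acc
  have hnd : (PySem.List.pyRange rt.1 (rt.2 + 1)).Nodup :=
    (pvPyRange_pairwise _ _).imp (fun h => ne_of_lt h)
  rw [pvFoldl_add_filter _ _ _ hnd (by intro x _ hx; exact absurd hx (by simp [PySem.Set.empty]))]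
  simp [PySem.Set.empty]

-- ===== the test characterised over Nat =====

lemma pvAtest_iff (s : List Char) :
    pvAtest s = true ↔
      ∃ dn : Nat, 1 ≤ dn ∧ 2 * dn ≤ s.length ∧ dn ∣ s.length ∧
        s = (List.replicate (s.length / dn) (s.take dn)).flatten := by
  unfold pvAtest
  rw [List.any_eq_true]
  have hfd : PySem.Int.floordiv (s.length : Int) 2 = (s.length : Int) / 2 :=
    PySem.Int.floordiv_eq_ediv_of_pos (by omega)
  constructor
  · rintro ⟨d, hmem, hcond⟩
    obtain ⟨hd1, hd2⟩ := PySem.List.mem_pyRange_one.mp hmem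
    rw [hfd] at hd2
    obtain ⟨dn, rfl⟩ : ∃ dn : Nat, d = (dn : Int) := ⟨d.toNat, by omega⟩
    have hdn1 : 1 ≤ dn := by exact_mod_cast hd1
    have hdn2 : 2 * dn ≤ s.length := by omega
    simp only [Bool.and_eq_true, beq_iff_eq] at hcond
    obtain ⟨hmod, heq⟩ := hcond
    have hdvd : dn ∣ s.length := by
      have := (PySem.Int.mod_eq_zero_iff_dvd _ _).mp hmod
      exact_mod_cast this
    refine ⟨dn, hdn1, hdn2, hdvd, ?_⟩
    rw [PySem.List.slice_to_natCast, PySem.Int.floordiv_natCast,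
      show PySem.List.pyRepeat (s.take dn) ((s.length / dn : Nat) : Int)
          = (List.replicate (s.length / dn) (s.take dn)).flatten from by
        unfold PySem.List.pyRepeat; rw [Int.toNat_natCast]] at heq
    exact heq
  · rintro ⟨dn, hdn1, hdn2, hdvd, heq⟩
    refine ⟨(dn : Int), PySem.List.mem_pyRange_one.mpr ⟨by exact_mod_cast hdn1, ?_⟩, ?_⟩
    · rw [hfd]
      omega
    · simp only [Bool.and_eq_true, beq_iff_eq]
      constructor
      · exact (PySem.Int.mod_eq_zero_iff_dvd _ _).mpr (by exact_mod_cast hdvd)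
      · rw [PySem.List.slice_to_natCast, PySem.Int.floordiv_natCast]
        rw [show PySem.List.pyRepeat (s.take dn) ((s.length / dn : Nat) : Int)
            = (List.replicate (s.length / dn) (s.take dn)).flatten from by
          unfold PySem.List.pyRepeat; rw [Int.toNat_natCast]]
        exact heq

-- ===== B's generator characterised =====

def pvMkI (d block L : Int) : Int :=
  (List.range (PySem.Int.floordiv L d).toNat).foldl
    (fun m _ => m * (10 : Int) ^ d.toNat + block) 0

def pvCand (first last : Int) : List Int :=
  (PySem.List.pyRange 2 (((PySem.Int.toChars last).length : Int) + 1)).flatMap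
    (fun L =>
      (PySem.List.pyRange 1 (PySem.Int.floordiv L 2 + 1)).flatMap
        (fun d =>
          if PySem.Int.mod L d ≠ 0 then []
          else
            ((PySem.List.pyRange ((10 : Int) ^ (d - 1).toNat) ((10 : Int) ^ d.toNat)).filter
                (fun block => decide (first ≤ pvMkI d block L ∧ pvMkI d block L ≤ last))).map
              (fun block => pvMkI d block L)))

lemma pvB_eq (rt : Int × Int) :
    get_invalid_id_sub_alt rt
      = PySem.Set.ofList (PySem.List.sorted (pvCand rt.1 rt.2) (fun x => x) false) := by
  unfold get_invalid_id_sub_alt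
  refine congrArg (fun l => PySem.Set.ofList (PySem.List.sorted l (fun x => x) false)) ?_
  unfold pvCand
  trans ((PySem.List.pyRange 2 (((PySem.Int.toChars rt.2).length : Int) + 1)).foldl
    (fun acc L => acc ++
      (PySem.List.pyRange 1 (PySem.Int.floordiv L 2 + 1)).flatMap
        (fun d =>
          if PySem.Int.mod L d ≠ 0 then []
          else
            ((PySem.List.pyRange ((10 : Int) ^ (d - 1).toNat) ((10 : Int) ^ d.toNat)).filter
                (fun block => decide (rt.1 ≤ pvMkI d block L ∧ pvMkI d block L ≤ rt.2))).map
              (fun block => pvMkI d block L))) [])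
  · apply PySem.List.foldl_congr_mem
    intro acc L _
    trans ((PySem.List.pyRange 1 (PySem.Int.floordiv L 2 + 1)).foldl
      (fun acc2 d => acc2 ++
        (if PySem.Int.mod L d ≠ 0 then []
         else
           ((PySem.List.pyRange ((10 : Int) ^ (d - 1).toNat) ((10 : Int) ^ d.toNat)).filter
               (fun block => decide (rt.1 ≤ pvMkI d block L ∧ pvMkI d block L ≤ rt.2))).map
             (fun block => pvMkI d block L))) acc)
    · apply PySem.List.foldl_congr_mem
      intro acc2 d _
      by_cases hm : PySem.Int.mod L d ≠ 0
      · simp [hm]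
      · rw [if_neg hm, if_neg hm]
        trans ((PySem.List.pyRange ((10 : Int) ^ (d - 1).toNat) ((10 : Int) ^ d.toNat)).foldl
          (fun acc3 block =>
            if rt.1 ≤ pvMkI d block L ∧ pvMkI d block L ≤ rt.2
            then acc3 ++ [pvMkI d block L] else acc3) acc2)
        · apply PySem.List.foldl_congr_mem
          intro acc3 block _
          rfl
        · exact PySem.List.foldl_append_ite
            (fun block => rt.1 ≤ pvMkI d block L ∧ pvMkI d block L ≤ rt.2)
            (fun block => pvMkI d block L) _ _
    · rw [PySem.List.foldl_append_eq_flatMap]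
  · rw [PySem.List.foldl_append_eq_flatMap]
    rfl

lemma pvCand_mem (first last x : Int) :
    x ∈ pvCand first last ↔
      ∃ L, (2 ≤ L ∧ L < ((PySem.Int.toChars last).length : Int) + 1) ∧
        ∃ d, (1 ≤ d ∧ d < PySem.Int.floordiv L 2 + 1) ∧
          PySem.Int.mod L d = 0 ∧
          ∃ block, ((10 : Int) ^ (d - 1).toNat ≤ block ∧ block < (10 : Int) ^ d.toNat) ∧
            (first ≤ pvMkI d block L ∧ pvMkI d block L ≤ last) ∧ x = pvMkI d block L := by
  unfold pvCand
  simp only [List.mem_flatMap, List.mem_map, List.mem_filter, PySem.List.mem_pyRange_one,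
    decide_eq_true_eq]
  constructor
  · rintro ⟨L, hL, d, hd, hx⟩
    by_cases hm : PySem.Int.mod L d ≠ 0
    · rw [if_pos hm] at hx; simp at hx
    · rw [if_neg hm] at hx
      push_neg at hm
      simp only [List.mem_map, List.mem_filter, PySem.List.mem_pyRange_one,
        decide_eq_true_eq] at hx
      obtain ⟨block, ⟨hb, hcond⟩, rfl⟩ := hx
      exact ⟨L, hL, d, hd, hm, block, hb, hcond, rfl⟩
  · rintro ⟨L, hL, d, hd, hm, block, hb, hcond, rfl⟩
    refine ⟨L, hL, d, hd, ?_⟩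
    rw [if_neg (by simpa using hm)]
    simp only [List.mem_map, List.mem_filter, PySem.List.mem_pyRange_one, decide_eq_true_eq]
    exact ⟨block, ⟨hb, hcond⟩, rfl⟩

lemma pvFoldRange_eq_mk (dn : Nat) (b : Int) (hb : 0 ≤ b) : ∀ k : Nat,
    (List.range k).foldl (fun m _ => m * (10 : Int) ^ dn + b) 0
      = ((pvMk b.toNat dn k : Nat) : Int) := by
  intro k
  induction k with
  | zero => simp [pvMk]
  | succ k ih =>
    rw [List.range_succ, List.foldl_append, ih]
    simp only [List.foldl_cons, List.foldl_nil, pvMk]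
    push_cast
    omega

lemma pvTake_flatten_replicate {k : Nat} (hk : 1 ≤ k) (t : List Char) :
    ((List.replicate k t).flatten).take t.length = t := by
  rw [show k = (k - 1) + 1 by omega, List.replicate_succ, List.flatten_cons, List.take_left]

lemma pvFlatten_replicate_length (k : Nat) (t : List Char) :
    ((List.replicate k t).flatten).length = k * t.length := by
  simp [List.length_flatten, List.map_replicate, List.sum_replicate, smul_eq_mul]

lemma pvCand_sound {first last x : Int} (h : x ∈ pvCand first last) :
    first ≤ x ∧ x ≤ last ∧ pvAtest (PySem.Int.toChars x) = true := by
  obtain ⟨L, ⟨hL2, _⟩, d, ⟨hd1, hdlt⟩, hmod, block, ⟨hbl, hbu⟩, ⟨hc1, hc2⟩, rfl⟩ :=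
    (pvCand_mem first last x).mp h
  set dn := d.toNat with hdn
  have hdE : d = (dn : Int) := by omega
  have hdn1 : 1 ≤ dn := by omega
  have hd1' : (d - 1).toNat = dn - 1 := by omega
  have hLE : L = ((L.toNat : Nat) : Int) := by omega
  set Ln := L.toNat with hLn
  have hfd : PySem.Int.floordiv L d = ((Ln / dn : Nat) : Int) := by
    rw [hLE, hdE, PySem.Int.floordiv_natCast]
  set kn := Ln / dn with hkn
  have hdvd : dn ∣ Ln := by
    have hdId : d ∣ L := (PySem.Int.mod_eq_zero_iff_dvd _ _).mp hmod
    rw [hLE, hdE] at hdId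
    exact_mod_cast hdId
  have h2d : 2 * dn ≤ Ln := by
    have : d ≤ PySem.Int.floordiv L 2 := by omega
    rw [PySem.Int.floordiv_eq_ediv_of_pos (by omega)] at this
    omega
  obtain ⟨c, hc⟩ := hdvd
  have hknc : kn = c := by
    rw [hkn, hc, Nat.mul_div_cancel_left _ (by omega)]
  have hkn2 : 2 ≤ kn := by
    rw [hknc]
    have hx2 : dn * 2 ≤ dn * c := by linarith [hc, h2d]
    exact Nat.le_of_mul_le_mul_left hx2 (by omega)
  have hp1 : (0:Int) < 10 ^ (dn - 1) := by positivity
  rw [hd1'] at hbl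
  have hb0 : 0 ≤ block := by omega
  set bn := block.toNat with hbn
  have hbE : block = (bn : Int) := by omega
  have hbn1 : 10 ^ (dn - 1) ≤ bn := by
    have h' : (10:Int) ^ (dn - 1) ≤ (bn : Int) := by rw [← hbE]; exact hbl
    exact_mod_cast h'
  have hbn2 : bn < 10 ^ dn := by
    have h' : (bn : Int) < (10:Int) ^ dn := by rw [← hbE]; exact hbu
    exact_mod_cast h'
  have hxval : pvMkI d block L = ((pvMk bn dn kn : Nat) : Int) := by
    unfold pvMkI
    rw [hfd, Int.toNat_natCast, hbE, hdE, Int.toNat_natCast]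
    rw [pvFoldRange_eq_mk dn (bn : Int) (by positivity) kn, Int.toNat_natCast]
  refine ⟨hc1, hc2, ?_⟩
  rw [hxval]
  have h0x : (0:Int) ≤ ((pvMk bn dn kn : Nat) : Int) := by positivity
  rw [pvToChars_nonneg h0x, Int.toNat_natCast]
  rw [pvRepr_mk hdn1 hbn1 hbn2 kn (by omega)]
  have hlenb : (pvRepr bn).length = dn := pvRepr_len_eq hdn1 hbn1 hbn2
  apply (pvAtest_iff _).mpr
  refine ⟨dn, hdn1, ?_, ?_, ?_⟩
  · rw [pvFlatten_replicate_length, hlenb]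
    exact Nat.mul_le_mul_right dn hkn2
  · rw [pvFlatten_replicate_length, hlenb]
    exact ⟨kn, by ring⟩
  · rw [pvFlatten_replicate_length, hlenb, Nat.mul_div_cancel _ (by omega)]
    rw [← hlenb, pvTake_flatten_replicate (by omega)]

lemma pvAtest_neg {x : Int} (hx : x < 0) : pvAtest (PySem.Int.toChars x) = false := by
  rw [pvToChars_neg hx]
  by_contra hne
  have htrue : pvAtest ('-' :: pvRepr x.natAbs) = true := by
    simpa using hne
  obtain ⟨dn, hd1, hd2, hdvd, heq⟩ := (pvAtest_iff _).mp htrue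
  set s := '-' :: pvRepr x.natAbs with hsdef
  set kn := s.length / dn with hkn
  obtain ⟨c, hc⟩ := hdvd
  have hknc : kn = c := by rw [hkn, hc, Nat.mul_div_cancel_left _ (by omega)]
  have hkn2 : 2 ≤ kn := by
    rw [hknc]
    have hx2 : dn * 2 ≤ dn * c := by linarith [hc, hd2]
    exact Nat.le_of_mul_le_mul_left hx2 (by omega)
  have hdlen : dn ≤ s.length := by omega
  have htlen : (s.take dn).length = dn := by
    rw [List.length_take]
    omega
  have hdrop : s.drop dn = ((List.replicate (kn - 1) (s.take dn)).flatten) := by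
    have h' := List.drop_left (l₁ := s.take dn)
      (l₂ := (List.replicate (kn - 1) (s.take dn)).flatten)
    rw [htlen] at h'
    conv_lhs => rw [heq, show kn = (kn - 1) + 1 by omega, List.replicate_succ,
      List.flatten_cons]
    rw [h']
  have hmem : '-' ∈ s.drop dn := by
    rw [hdrop, show kn - 1 = (kn - 2) + 1 by omega, List.replicate_succ, List.flatten_cons]
    apply List.mem_append_left
    rw [hsdef, List.take_cons (by omega : 0 < dn)]
    exact List.mem_cons_self
  have hmem' : '-' ∈ pvRepr x.natAbs := by
    rw [hsdef, show dn = (dn - 1) + 1 by omega, List.drop_succ_cons] at hmem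
    exact (List.drop_sublist _ _).subset hmem
  exact pvRepr_ne_minus _ _ hmem' rfl

lemma pvCand_complete {first last x : Int} (h1 : first ≤ x) (h2 : x ≤ last)
    (h3 : pvAtest (PySem.Int.toChars x) = true) : x ∈ pvCand first last := by
  have hx0 : 0 ≤ x := by
    by_contra hneg
    push_neg at hneg
    rw [pvAtest_neg hneg] at h3
    exact Bool.false_ne_true h3
  set nm := x.toNat with hnm
  have hsx : PySem.Int.toChars x = pvRepr nm := pvToChars_nonneg hx0
  rw [hsx] at h3
  obtain ⟨dn, hd1, hd2, hdvd, heq⟩ := (pvAtest_iff _).mp h3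
  set s := pvRepr nm with hs
  set n := s.length with hn
  set kn := n / dn with hkn
  obtain ⟨c, hc⟩ := hdvd
  have hknc : kn = c := by rw [hkn, hc, Nat.mul_div_cancel_left _ (by omega)]
  have hkn2 : 2 ≤ kn := by
    rw [hknc]
    have hx2 : dn * 2 ≤ dn * c := by linarith [hc, hd2]
    exact Nat.le_of_mul_le_mul_left hx2 (by omega)
  have hn2 : 2 ≤ n := by omega
  have hnm1 : 1 ≤ nm := by
    by_contra h0
    have : nm = 0 := by omega
    rw [this] at hs
    rw [hs] at hn
    rw [pvRepr_lt (by omega)] at hn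
    simp at hn
    omega
  set t := s.take dn with ht
  have htlen : t.length = dn := by
    rw [ht, List.length_take]
    omega
  set bn := pvVal t with hbn
  have hbn2 : bn < 10 ^ dn := by
    rw [hbn, ← htlen]
    exact pvVal_lt t (fun cc hcc => (pvRepr_digits nm cc (List.take_subset _ _ hcc)).2)
  have hbn1 : 10 ^ (dn - 1) ≤ bn :=
    pvVal_take_lower hnm1 hd1 (by rw [← hs, ← hn]; omega)
  have hval : nm = pvMk bn dn kn := by
    conv_lhs => rw [← pvVal_repr nm]
    rw [← hs]
    conv_lhs => rw [heq]
    rw [pvVal_flatten_replicate, htlen, ← hbn]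
  -- lengths for the outer range
  have hlast0 : (0:Int) ≤ last := by omega
  have hlastn : 1 ≤ last.toNat := by omega
  have hlenlast : (PySem.Int.toChars last).length = (pvRepr last.toNat).length := by
    rw [pvToChars_nonneg hlast0]
  have hmono : n ≤ (pvRepr last.toNat).length := by
    rw [hn, hs]
    exact pvRepr_len_mono hnm1 (by omega)
  have hmk : pvMkI (dn : Int) (bn : Int) (n : Int) = x := by
    unfold pvMkI
    rw [PySem.Int.floordiv_natCast, Int.toNat_natCast, Int.toNat_natCast]
    rw [pvFoldRange_eq_mk dn (bn : Int) (by positivity) (n / dn), Int.toNat_natCast]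
    rw [← hkn, ← hval]
    omega
  apply (pvCand_mem first last x).mpr
  refine ⟨(n : Int), ⟨by exact_mod_cast hn2, ?_⟩, (dn : Int), ⟨by exact_mod_cast hd1, ?_⟩, ?_,
    (bn : Int), ⟨?_, ?_⟩, ?_, ?_⟩
  · rw [hlenlast]
    omega
  · rw [PySem.Int.floordiv_eq_ediv_of_pos (by omega)]
    have : 2 * dn ≤ n := hd2
    omega
  · apply (PySem.Int.mod_eq_zero_iff_dvd _ _).mpr
    have hdvdn : dn ∣ n := ⟨kn, by rw [hknc]; exact hc⟩
    exact_mod_cast hdvdn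
  · have he : ((dn : Int) - 1).toNat = dn - 1 := by omega
    rw [he]
    push_cast
    exact_mod_cast hbn1
  · rw [Int.toNat_natCast]
    exact_mod_cast hbn2
  · rw [hmk]
    exact ⟨h1, h2⟩
  · rw [hmk]

lemma pvFoldl_add_sublist {α : Type} [BEq α] :
    ∀ (l acc : List α), ∃ u : List α,
      l.foldl PySem.Set.add acc = acc ++ u ∧ u.Sublist l := by
  intro l
  induction l with
  | nil => intro acc; exact ⟨[], by simp⟩
  | cons x l ih =>
    intro acc
    simp only [List.foldl_cons]
    by_cases hx : acc.contains x = true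
    · obtain ⟨u, hu, hs⟩ := ih acc
      refine ⟨u, ?_, hs.cons x⟩
      rw [← hu]
      congr 1
      simp [PySem.Set.add, PySem.Set.contains, hx]
    · obtain ⟨u, hu, hs⟩ := ih (acc ++ [x])
      refine ⟨x :: u, ?_, hs.cons₂ x⟩
      rw [List.append_assoc] at hu
      simpa [PySem.Set.add, PySem.Set.contains, hx] using hu

lemma pvOfList_sublist {α : Type} [BEq α] (l : List α) :
    (PySem.Set.ofList l).Sublist l := by
  obtain ⟨u, hu, hs⟩ := pvFoldl_add_sublist l []
  rw [PySem.Set.ofList_eq_foldl, hu]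
  simpa using hs


-- ===== VERDICT (by name: the statement is the Claim_ definition above) =====
theorem get_invalid_id_sub_spec : Claim_equal_get_invalid_id_sub := by
  intro rt _
  unfold Spec_get_invalid_id_sub
  rw [pvA_eq_filter, pvB_eq]
  have hmem : ∀ y : Int,
      y ∈ (PySem.List.pyRange rt.1 (rt.2 + 1)).filter (fun i => pvAtest (PySem.Int.toChars i))
        ↔ y ∈ PySem.Set.ofList (PySem.List.sorted (pvCand rt.1 rt.2) (fun x => x) false) := by
    intro y
    rw [PySem.Set.mem_ofList, (PySem.List.sorted_perm _ _ _).mem_iff]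
    rw [List.mem_filter, PySem.List.mem_pyRange_one]
    constructor
    · rintro ⟨⟨hy1, hy2⟩, hy3⟩
      exact pvCand_complete hy1 (by omega) hy3
    · intro hy
      obtain ⟨h1, h2, h3⟩ := pvCand_sound hy
      exact ⟨⟨h1, by omega⟩, h3⟩
  have hpR : ((PySem.List.pyRange rt.1 (rt.2 + 1)).filter
      (fun i => pvAtest (PySem.Int.toChars i))).Pairwise (· < ·) :=
    (pvPyRange_pairwise _ _).filter _
  have hpS : (PySem.Set.ofList (PySem.List.sorted (pvCand rt.1 rt.2)
      (fun x => x) false)).Pairwise (· ≤ ·) := by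
    refine List.Pairwise.sublist (pvOfList_sublist _) ?_
    have := PySem.List.sorted_pairwise (pvCand rt.1 rt.2) (fun x => x)
    simpa using this
  have hndR := hpR.imp (fun h => ne_of_lt h)
  have hndS := PySem.Set.nodup_ofList (PySem.List.sorted (pvCand rt.1 rt.2) (fun x => x) false)
  exact List.Perm.eq_of_pairwise (fun a b _ _ hab hba => le_antisymm hab hba)
    (hpR.imp (fun h => le_of_lt h)) hpS
    ((List.perm_ext_iff_of_nodup hndR hndS).mpr hmem)
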